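-- pv_equiv track=rewrite | github.com/ahmedsallu7493/F.R.I.D.A.Y-2.1 | Backend/RealTimeSearchEngine.py | answer_modifier
-- ===== SOURCE A (Python) =====
-- def answer_modifier(answer):
--     blacklist_phrases = [
--         "I'm a large language model",
--         "Please note that",
--         "I suggest checking",
--         "You can also search for",
--         "reliable weather website",
--         "Weather.com",
--         "AccuWeather",
--         "News channel",
--         "mobile app",
--         "look for local news",
--         "<|header_start|>",
--         "<|header_end|>",
--         "Is there anything else I can help you with?",
--         "Let me know if",
--         "I can't access real-time",
--     ]
--
--     stop_keywords = [
--         "Sunset",  # Weather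
--         "Volume",  # Stock market
--         "Today's top news headlines are:"  # News start
--     ]
--
--     cleaned_lines = []
--     seen_lines = set()
--     stop_triggered = False
--
--     for line in answer.splitlines():
--         stripped_line = line.strip()
--         if not stripped_line:
--             continue
--
--         # Skip blacklisted lines
--         if any(bad.lower() in stripped_line.lower() for bad in blacklist_phrases):
--             continue
--
--         # Stop after key lines
--         if any(stripped_line.startswith(key) for key in stop_keywords):
--             stop_triggered = True
--             continue
--
--         if stop_triggered:
--             continue
--
--         if stripped_line not in seen_lines:
--             cleaned_lines.append(stripped_line)
--             seen_lines.add(stripped_line)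
--
--     return "\n".join(cleaned_lines)
-- ===== SOURCE B (Python) =====
-- def answer_modifier(answer):
--     blacklist_phrases = [
--         "I'm a large language model",
--         "Please note that",
--         "I suggest checking",
--         "You can also search for",
--         "reliable weather website",
--         "Weather.com",
--         "AccuWeather",
--         "News channel",
--         "mobile app",
--         "look for local news",
--         "<|header_start|>",
--         "<|header_end|>",
--         "Is there anything else I can help you with?",
--         "Let me know if",
--         "I can't access real-time",
--     ]
--
--     stop_keywords = [
--         "Sunset",
--         "Volume",
--         "Today's top news headlines are:",
--     ]
--
--     def blacklisted(line):
--         low = line.lower()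
--         return any(bad.lower() in low for bad in blacklist_phrases)
--
--     # stripped, non-empty lines
--     lines = [s for s in (l.strip() for l in answer.splitlines()) if s]
--
--     # cutoff: first non-blacklisted line starting with a stop keyword
--     cutoff = next((i for i, s in enumerate(lines)
--                    if not blacklisted(s) and any(s.startswith(k) for k in stop_keywords)),
--                   len(lines))
--
--     kept = [s for s in lines[:cutoff] if not blacklisted(s)]
--     return "\n".join(dict.fromkeys(kept))
-- ===== Notes on version B (the rewrite author's own statement) =====
-- stated objective: alternative
-- what changed: Replaces A's single flag-and-set stateful scan with a find-cutoff-then-filter pipeline: build the stripped non-empty lines, locate the first non-blacklisted stop line, slice before it, filter out blacklisted lines, and dedupe with dict.fromkeys.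
import Mathlib
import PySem

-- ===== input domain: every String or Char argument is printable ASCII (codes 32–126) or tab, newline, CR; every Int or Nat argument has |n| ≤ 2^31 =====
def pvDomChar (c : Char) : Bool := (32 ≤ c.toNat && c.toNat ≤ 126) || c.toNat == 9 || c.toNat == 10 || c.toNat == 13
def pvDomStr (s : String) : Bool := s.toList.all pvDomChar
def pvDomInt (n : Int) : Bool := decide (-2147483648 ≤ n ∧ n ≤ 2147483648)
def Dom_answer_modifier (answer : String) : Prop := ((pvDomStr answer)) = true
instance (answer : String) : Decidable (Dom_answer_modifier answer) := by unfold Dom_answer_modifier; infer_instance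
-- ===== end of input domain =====

-- B replaces A's flag-and-seen-set single stateful scan with a find-cutoff-then-filter-then-dedup
-- pipeline (alternative decomposition, same asymptotic cost); return values proved equal on all inputs.

-- shared literal constants of both Pythons
def pvBlacklist : List String := [
  "I'm a large language model",
  "Please note that",
  "I suggest checking",
  "You can also search for",
  "reliable weather website",
  "Weather.com",
  "AccuWeather",
  "News channel",
  "mobile app",
  "look for local news",
  "<|header_start|>",
  "<|header_end|>",
  "Is there anything else I can help you with?",
  "Let me know if",
  "I can't access real-time"]

def pvStops : List String := ["Sunset", "Volume", "Today's top news headlines are:"]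

-- any(bad.lower() in line.lower() for bad in blacklist_phrases)
def pvIsBlack (line : String) : Bool :=
  pvBlacklist.any (fun bad => PySem.Str.isIn (PySem.Str.lower bad) (PySem.Str.lower line))

-- any(line.startswith(key) for key in stop_keywords)
def pvIsStop (line : String) : Bool :=
  pvStops.any (fun key => PySem.Str.startswith line key)

-- ===== PORT A =====
-- A's loop body: state is (cleaned_lines, seen_lines, stop_triggered)
def pvStepA (st : List String × PySem.Set String × Bool) (line : String) :
    List String × PySem.Set String × Bool :=
  let s := PySem.Str.strip line
  if s = "" then st
  else if pvIsBlack s then st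
  else if pvIsStop s then (st.1, st.2.1, true)
  else if st.2.2 then st
  else if st.2.1.contains s then st
  else (st.1 ++ [s], st.2.1.add s, st.2.2)

def answer_modifier (answer : String) : String :=
  PySem.Str.join "\n"
    (((PySem.Str.splitlines answer).foldl pvStepA ([], PySem.Set.ofList [], false)).1)

-- ===== PORT B =====
def answer_modifier_alt (answer : String) : String :=
  let lines := ((PySem.Str.splitlines answer).map PySem.Str.strip).filter (fun s => s ≠ "")
  let cutoff := lines.findIdx (fun s => !pvIsBlack s && pvIsStop s)
  let kept := (lines.take cutoff).filter (fun s => !pvIsBlack s)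
  PySem.Str.join "\n" (PySem.List.dedup kept)

-- ===== PRECONDITION & SPEC =====
def Spec_answer_modifier (answer : String) (out : String) : Prop := out = answer_modifier_alt answer
instance (answer : String) (out : String) : Decidable (Spec_answer_modifier answer out) := by unfold Spec_answer_modifier; infer_instance

-- ===== CLAIM (what is proved, stated in full; the proofs are below) =====
def Claim_equal_answer_modifier : Prop := ∀ (answer : String), Dom_answer_modifier answer → Spec_answer_modifier answer (answer_modifier answer)

-- ===== LEMMAS AND PROOFS =====

-- proof-side recursion capturing the kept lines of both programs
def pvProc (ls : List String) (c : List String) : List String :=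
  match ls with
  | [] => c
  | l :: ls =>
    let s := PySem.Str.strip l
    if s = "" then pvProc ls c
    else if pvIsBlack s then pvProc ls c
    else if pvIsStop s then c
    else pvProc ls (PySem.Set.add c s)

-- once the stop flag is set, A's state never changes
theorem pvFoldA_stop (ls : List String) (c : List String) (sn : PySem.Set String) :
    ls.foldl pvStepA (c, sn, true) = (c, sn, true) := by
  induction ls with
  | nil => rfl
  | cons l ls ih =>
    simp only [List.foldl_cons, pvStepA]
    split_ifs <;> simpa using ih

-- A's fold, started with seen = cleaned and flag down, computes pvProc
theorem pvFoldA_eq_proc (ls : List String) (c : List String) :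
    (ls.foldl pvStepA (c, c, false)).1 = pvProc ls c := by
  induction ls generalizing c with
  | nil => rfl
  | cons l ls ih =>
    by_cases h0 : PySem.Str.strip l = ""
    · have hstep : pvStepA (c, c, false) l = (c, c, false) := by simp [pvStepA, h0]
      calc (List.foldl pvStepA (c, c, false) (l :: ls)).1
          = (List.foldl pvStepA (c, c, false) ls).1 := by rw [List.foldl_cons, hstep]
        _ = pvProc ls c := ih c
        _ = pvProc (l :: ls) c := by simp [pvProc, h0]
    · by_cases hb : pvIsBlack (PySem.Str.strip l)
      · have hstep : pvStepA (c, c, false) l = (c, c, false) := by simp [pvStepA, h0, hb]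
        calc (List.foldl pvStepA (c, c, false) (l :: ls)).1
            = (List.foldl pvStepA (c, c, false) ls).1 := by rw [List.foldl_cons, hstep]
          _ = pvProc ls c := ih c
          _ = pvProc (l :: ls) c := by simp [pvProc, h0, hb]
      · by_cases hs : pvIsStop (PySem.Str.strip l)
        · have hstep : pvStepA (c, c, false) l = (c, c, true) := by simp [pvStepA, h0, hb, hs]
          calc (List.foldl pvStepA (c, c, false) (l :: ls)).1
              = (List.foldl pvStepA (c, c, true) ls).1 := by rw [List.foldl_cons, hstep]
            _ = c := by rw [pvFoldA_stop]
            _ = pvProc (l :: ls) c := by simp [pvProc, h0, hb, hs]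
        · by_cases hc : PySem.Str.strip l ∈ c
          · have ha : PySem.Set.add c (PySem.Str.strip l) = c := by
              simp [PySem.Set.add, hc]
            have hstep : pvStepA (c, c, false) l = (c, c, false) := by
              simp [pvStepA, h0, hb, hs, PySem.Set.contains, hc]
            calc (List.foldl pvStepA (c, c, false) (l :: ls)).1
                = (List.foldl pvStepA (c, c, false) ls).1 := by
                  rw [List.foldl_cons, hstep]
              _ = pvProc ls c := ih c
              _ = pvProc (l :: ls) c := by simp [pvProc, h0, hb, hs, ha]
          · have ha : PySem.Set.add c (PySem.Str.strip l) = c ++ [PySem.Str.strip l] := by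
              simp [PySem.Set.add, hc]
            have hstep : pvStepA (c, c, false) l =
                (c ++ [PySem.Str.strip l], c ++ [PySem.Str.strip l], false) := by
              simp [pvStepA, h0, hb, hs, PySem.Set.contains, PySem.Set.add, hc]
            calc (List.foldl pvStepA (c, c, false) (l :: ls)).1
                = (List.foldl pvStepA
                    (c ++ [PySem.Str.strip l], c ++ [PySem.Str.strip l], false) ls).1 := by
                  rw [List.foldl_cons, hstep]
              _ = pvProc ls (c ++ [PySem.Str.strip l]) := ih _
              _ = pvProc (l :: ls) c := by simp [pvProc, h0, hb, hs, ha]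

-- B's cutoff/filter/dedup pipeline, with the dedup accumulator generalized, computes pvProc
theorem pvPipe_eq_proc (ls : List String) (c : List String) :
    (((((ls.map PySem.Str.strip).filter (fun s => s ≠ "")).take
        (((ls.map PySem.Str.strip).filter (fun s => s ≠ "")).findIdx
          (fun s => !pvIsBlack s && pvIsStop s))).filter
            (fun s => !pvIsBlack s)).foldl PySem.Set.add c) = pvProc ls c := by
  induction ls generalizing c with
  | nil => rfl
  | cons l ls ih =>
    rw [List.map_cons, List.filter_cons]
    by_cases h0 : PySem.Str.strip l = ""
    · rw [if_neg (by simp [h0])]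
      simpa only [pvProc, if_pos h0] using ih c
    · rw [if_pos (by simp [h0]), List.findIdx_cons]
      by_cases hb : pvIsBlack (PySem.Str.strip l)
      · have hp : (!pvIsBlack (PySem.Str.strip l) && pvIsStop (PySem.Str.strip l)) = false := by
          simp [hb]
        rw [show (cond ((fun s => !pvIsBlack s && pvIsStop s) (PySem.Str.strip l))
              0 (List.findIdx (fun s => !pvIsBlack s && pvIsStop s)
                (List.filter (fun s => decide (s ≠ "")) (List.map PySem.Str.strip ls)) + 1)) =
            List.findIdx (fun s => !pvIsBlack s && pvIsStop s)
                (List.filter (fun s => decide (s ≠ "")) (List.map PySem.Str.strip ls)) + 1 from by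
          simp [hp], List.take_succ_cons, List.filter_cons, if_neg (by simp [hb])]
        simpa only [pvProc, if_neg h0, if_pos hb] using ih c
      · by_cases hs : pvIsStop (PySem.Str.strip l)
        · have hp : (!pvIsBlack (PySem.Str.strip l) && pvIsStop (PySem.Str.strip l)) = true := by
            simp [hb, hs]
          rw [show (cond ((fun s => !pvIsBlack s && pvIsStop s) (PySem.Str.strip l))
                0 (List.findIdx (fun s => !pvIsBlack s && pvIsStop s)
                  (List.filter (fun s => decide (s ≠ "")) (List.map PySem.Str.strip ls)) + 1)) =
              0 from by simp [hp]]
          simp [pvProc, h0, hb, hs]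
        · have hp : (!pvIsBlack (PySem.Str.strip l) && pvIsStop (PySem.Str.strip l)) = false := by
            simp [hs]
          rw [show (cond ((fun s => !pvIsBlack s && pvIsStop s) (PySem.Str.strip l))
                0 (List.findIdx (fun s => !pvIsBlack s && pvIsStop s)
                  (List.filter (fun s => decide (s ≠ "")) (List.map PySem.Str.strip ls)) + 1)) =
              List.findIdx (fun s => !pvIsBlack s && pvIsStop s)
                  (List.filter (fun s => decide (s ≠ "")) (List.map PySem.Str.strip ls)) + 1 from by
            simp [hp], List.take_succ_cons, List.filter_cons, if_pos (by simp [hb]),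
            List.foldl_cons]
          simpa only [pvProc, if_neg h0, if_neg hb, if_neg hs] using
            ih (PySem.Set.add c (PySem.Str.strip l))

-- ===== VERDICT (by name: the statement is the Claim_ definition above) =====
theorem answer_modifier_spec : Claim_equal_answer_modifier := by
  intro answer _
  show answer_modifier answer = answer_modifier_alt answer
  unfold answer_modifier answer_modifier_alt
  rw [show (PySem.Set.ofList [] : PySem.Set String) = [] from rfl]
  rw [pvFoldA_eq_proc]
  dsimp only
  simp only [PySem.List.dedup, PySem.Set.ofList, PySem.Set.empty]
  rw [pvPipe_eq_proc]
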